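-- pv_equiv track=rewrite | github.com/JP2511/MTG-computer-game | AllCards/creatingFilesWithInformationAboutCards.py | listSeparatedByExpansions
-- ===== SOURCE A (Python) =====
-- def listSeparatedByExpansions(files, namesOfExpansions):
--     listOfListsOfExpansions = []
--     for i in namesOfExpansions:
--         listOfCards = []
--         for j in files:
--             if(j.split("_")[0]==i):
--                 listOfCards.append(j)
--         listOfListsOfExpansions.append(listOfCards)
--     return listOfListsOfExpansions
-- ===== SOURCE B (Python) =====
-- def listSeparatedByExpansions(files, namesOfExpansions):
--     # One pass over files: bucket each file under its prefix, then one lookup per name.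
--     pairs = [(f.split("_")[0], f) for f in files]
--     buckets = {}
--     for prefix, f in pairs:
--         buckets.setdefault(prefix, []).append(f)
--     return [list(buckets.get(name, [])) for name in namesOfExpansions]
-- ===== Notes on version B (the rewrite author's own statement) =====
-- stated objective: faster
-- what changed: Instead of rescanning all files once per expansion name, B makes one pass over files scattering each into a dict bucket keyed by its prefix, then gathers one bucket lookup per name.
import Mathlib
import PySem

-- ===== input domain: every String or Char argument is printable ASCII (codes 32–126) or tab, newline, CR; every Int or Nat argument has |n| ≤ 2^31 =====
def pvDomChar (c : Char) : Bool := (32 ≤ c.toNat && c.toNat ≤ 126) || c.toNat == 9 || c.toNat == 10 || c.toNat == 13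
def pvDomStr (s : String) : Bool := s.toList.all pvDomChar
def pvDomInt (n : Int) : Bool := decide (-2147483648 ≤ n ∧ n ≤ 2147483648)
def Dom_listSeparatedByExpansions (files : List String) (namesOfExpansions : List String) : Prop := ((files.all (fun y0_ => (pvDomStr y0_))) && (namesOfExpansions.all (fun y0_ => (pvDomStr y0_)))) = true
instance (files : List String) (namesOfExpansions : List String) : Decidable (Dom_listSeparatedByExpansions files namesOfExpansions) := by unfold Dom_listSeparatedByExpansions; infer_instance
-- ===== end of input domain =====

-- B replaces A's per-name rescan of all files with one scatter pass into dict buckets plus one lookup per name (faster).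

-- shared helper: j.split("_")[0] (split with nonempty sep always yields a nonempty list, so [0] never raises)
def pyPrefix (s : String) : String := ((PySem.Str.split? s "_").getD []).headD ""

-- ===== PORT A =====
def listSeparatedByExpansions (files : List String) (namesOfExpansions : List String) : List (List String) :=
  namesOfExpansions.foldl (fun acc i =>
    acc ++ [files.foldl (fun listOfCards j =>
      if pyPrefix j == i then listOfCards ++ [j] else listOfCards) []]) []

-- ===== PORT B =====
def listSeparatedByExpansions_alt (files : List String) (namesOfExpansions : List String) : List (List String) :=
  let pairs := files.map (fun f => (pyPrefix f, f))
  let buckets := pairs.foldl (fun d p => d.modify p.1 [] (· ++ [p.2])) PySem.Dict.empty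
  namesOfExpansions.map (fun name => buckets.getD name [])

-- ===== PRECONDITION & SPEC =====
def Spec_listSeparatedByExpansions (files : List String) (namesOfExpansions : List String) (out : List (List String)) : Prop := out = listSeparatedByExpansions_alt files namesOfExpansions
instance (files : List String) (namesOfExpansions : List String) (out : List (List String)) : Decidable (Spec_listSeparatedByExpansions files namesOfExpansions out) := by unfold Spec_listSeparatedByExpansions; infer_instance

-- ===== CLAIM (what is proved, stated in full; the proofs are below) =====
def Claim_equal_listSeparatedByExpansions : Prop := ∀ (files : List String) (namesOfExpansions : List String), Dom_listSeparatedByExpansions files namesOfExpansions → Spec_listSeparatedByExpansions files namesOfExpansions (listSeparatedByExpansions files namesOfExpansions)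

-- ===== LEMMAS AND PROOFS =====

-- A's inner loop is a filter
theorem inner_eq_filter (files : List String) (i : String) (acc : List String) :
    files.foldl (fun listOfCards j => if pyPrefix j == i then listOfCards ++ [j] else listOfCards) acc
      = acc ++ files.filter (fun j => pyPrefix j == i) := by
  induction files generalizing acc with
  | nil => simp
  | cons f fs ih =>
    simp only [List.foldl_cons, List.filter_cons]
    rw [ih]
    by_cases h : (pyPrefix f == i) = true
    · simp [h]
    · simp [h]

-- A's outer loop is a map
theorem outer_eq_map (names : List String) (g : String → List String) (acc : List (List String)) :
    names.foldl (fun acc i => acc ++ [g i]) acc = acc ++ names.map g := by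
  induction names generalizing acc with
  | nil => simp
  | cons n ns ih => simp [ih]

-- B's bucket lookup is the same filter
theorem bucket_eq_filter (files : List String) (name : String) :
    ((files.map (fun f => (pyPrefix f, f))).foldl
        (fun d p => d.modify p.1 [] (· ++ [p.2])) PySem.Dict.empty).getD name []
      = files.filter (fun j => pyPrefix j == name) := by
  rw [PySem.Dict.getD_foldl_modify_append]
  simp [List.filter_map, Function.comp_def]

-- ===== VERDICT (by name: the statement is the Claim_ definition above) =====
theorem listSeparatedByExpansions_spec : Claim_equal_listSeparatedByExpansions := by
  intro files names _
  show _ = _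
  unfold listSeparatedByExpansions listSeparatedByExpansions_alt
  rw [outer_eq_map]
  simp only [List.nil_append]
  apply List.map_congr_left
  intro name _
  rw [inner_eq_filter, bucket_eq_filter]
  simp
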